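-- pv_equiv track=rewrite | github.com/nkz-os/catastro-sp-module-nekazari | backend/app/catastro_clients.py | filter_cadastral_types
-- ===== SOURCE A (Python) =====
-- from typing import Dict, Any, Optional, Tuple, List
--
-- def filter_cadastral_types(feature_types: List[str]) -> List[str]:
--     """
--     Filter and sort feature types to prioritize cadastral parcels.
--     Sorts to specific priority keywords first, then others.
--     Excludes administrative boundaries explicitly.
--
--     Args:
--         feature_types: List of all feature types
--
--     Returns:
--         Filtered and sorted list
--     """
--     # Primary keywords (definitely parcels)
--     primary_keywords = ['parcel', 'finca', 'predio', 'cp:cadastralparcel']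
--
--     # Secondary keywords (related to cadastre but less specific)
--     secondary_keywords = ['catast', 'rustic', 'urban', 'cp:']
--
--     # Excluded keywords (administrative units, text, lines)
--     excluded_keywords = [
--         'municipio', 'concejo', 'cascourbano', 'poligono',
--         'txt', 'lin_', 'line', 'pt_', 'text', 'edif'
--     ]
--
--     primary_matches = []
--     secondary_matches = []
--
--     for ft in feature_types:
--         ft_lower = ft.lower()
--
--         # Skip excluded types
--         if any(keyword in ft_lower for keyword in excluded_keywords):
--             continue
--
--         # Check primary match
--         if any(keyword in ft_lower for keyword in primary_keywords):
--             primary_matches.append(ft)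
--             continue
--
--         # Check secondary match
--         if any(keyword in ft_lower for keyword in secondary_keywords):
--             secondary_matches.append(ft)
--
--     # Combine lists with primary first
--     result = primary_matches + secondary_matches
--
--     # If filtering removed everything (e.g. strict exclusion), fallback to original list
--     # but try to filter excluded ones at least
--     if not result and feature_types:
--         return [ft for ft in feature_types if not any(k in ft.lower() for k in excluded_keywords)]
--
--     return result
-- ===== SOURCE B (Python) =====
-- def filter_cadastral_types(feature_types):
--     """Decorate-sort-select: assign each feature a priority rank (0 primary,
--     1 secondary, 2 other, 3 excluded), stable-sort by rank, then select."""
--     primary_keywords = ['parcel', 'finca', 'predio', 'cp:cadastralparcel']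
--     secondary_keywords = ['catast', 'rustic', 'urban', 'cp:']
--     excluded_keywords = [
--         'municipio', 'concejo', 'cascourbano', 'poligono',
--         'txt', 'lin_', 'line', 'pt_', 'text', 'edif'
--     ]
--
--     def rank(ft):
--         low = ft.lower()
--         if any(k in low for k in excluded_keywords):
--             return 3
--         if any(k in low for k in primary_keywords):
--             return 0
--         if any(k in low for k in secondary_keywords):
--             return 1
--         return 2
--
--     ranked = sorted(((rank(ft), ft) for ft in feature_types), key=lambda p: p[0])
--     result = [ft for r, ft in ranked if r <= 1]
--     if result or not feature_types:
--         return result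
--     return [ft for r, ft in ranked if r <= 2]
-- ===== Notes on version B (the rewrite author's own statement) =====
-- stated objective: alternative
-- what changed: Replaced A's single classifying loop with two append accumulators by a decorate-sort-select (Schwartzian transform): each feature gets a priority rank (0 primary, 1 secondary, 2 other, 3 excluded), the decorated list is stable-sorted by rank, and the result/fallback are selections (rank<=1, rank<=2) from the sorted list.
import Mathlib
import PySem

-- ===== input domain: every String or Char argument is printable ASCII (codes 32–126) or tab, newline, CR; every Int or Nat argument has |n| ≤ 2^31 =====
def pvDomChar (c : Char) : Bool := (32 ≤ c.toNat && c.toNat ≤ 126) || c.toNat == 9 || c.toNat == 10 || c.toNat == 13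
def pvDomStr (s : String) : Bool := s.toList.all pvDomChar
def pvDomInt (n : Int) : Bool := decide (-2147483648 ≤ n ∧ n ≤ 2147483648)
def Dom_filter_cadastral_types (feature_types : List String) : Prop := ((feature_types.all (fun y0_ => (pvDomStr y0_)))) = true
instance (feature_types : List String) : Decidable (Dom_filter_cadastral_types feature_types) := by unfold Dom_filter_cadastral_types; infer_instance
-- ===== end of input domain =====

-- B replaces A's single classifying loop with two append accumulators by a
-- decorate-sort-select: rank each feature (0 primary, 1 secondary, 2 other,
-- 3 excluded), stable-sort the (rank, feature) pairs by rank, then select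
-- (objective: alternative algorithm, same exact result).

-- shared keyword constants (data, not algorithm)
def pvPrimaryKw : List String := ["parcel", "finca", "predio", "cp:cadastralparcel"]
def pvSecondaryKw : List String := ["catast", "rustic", "urban", "cp:"]
def pvExcludedKw : List String :=
  ["municipio", "concejo", "cascourbano", "poligono",
   "txt", "lin_", "line", "pt_", "text", "edif"]

-- ===== PORT A =====
-- the loop body of A: skip excluded, append to primary, else to secondary
def pvStepA (acc : List String × List String) (ft : String) : List String × List String :=
  let ft_lower := PySem.Str.lower ft
  if pvExcludedKw.any (fun keyword => PySem.Str.isIn keyword ft_lower) then acc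
  else if pvPrimaryKw.any (fun keyword => PySem.Str.isIn keyword ft_lower) then
    (acc.1 ++ [ft], acc.2)
  else if pvSecondaryKw.any (fun keyword => PySem.Str.isIn keyword ft_lower) then
    (acc.1, acc.2 ++ [ft])
  else acc

def filter_cadastral_types (feature_types : List String) : List String :=
  let ms := feature_types.foldl pvStepA ([], [])
  let result := ms.1 ++ ms.2
  if result = [] ∧ feature_types ≠ [] then
    feature_types.filter (fun ft =>
      !(pvExcludedKw.any (fun k => PySem.Str.isIn k (PySem.Str.lower ft))))
  else result

-- ===== PORT B =====
-- Source B's rank(ft): 3 excluded, 0 primary, 1 secondary, 2 other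
def pvRank (ft : String) : Int :=
  let low := PySem.Str.lower ft
  if pvExcludedKw.any (fun k => PySem.Str.isIn k low) then 3
  else if pvPrimaryKw.any (fun k => PySem.Str.isIn k low) then 0
  else if pvSecondaryKw.any (fun k => PySem.Str.isIn k low) then 1
  else 2

def filter_cadastral_types_alt (feature_types : List String) : List String :=
  let ranked := PySem.List.sorted (feature_types.map (fun ft => (pvRank ft, ft)))
      (fun p => p.1) false
  let result := (ranked.filter (fun p => p.1 ≤ 1)).map Prod.snd
  if result ≠ [] ∨ feature_types = [] then result
  else (ranked.filter (fun p => p.1 ≤ 2)).map Prod.snd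

-- ===== PRECONDITION & SPEC =====
def Spec_filter_cadastral_types (feature_types : List String) (out : List String) : Prop := out = filter_cadastral_types_alt feature_types
instance (feature_types : List String) (out : List String) : Decidable (Spec_filter_cadastral_types feature_types out) := by unfold Spec_filter_cadastral_types; infer_instance

-- ===== CLAIM (what is proved, stated in full; the proofs are below) =====
def Claim_equal_filter_cadastral_types : Prop := ∀ (feature_types : List String), Dom_filter_cadastral_types feature_types → Spec_filter_cadastral_types feature_types (filter_cadastral_types feature_types)

-- ===== LEMMAS AND PROOFS =====

-- bucket r l = the decorated features of rank r, in original order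
def pvBucket (r : Int) (l : List String) : List (Int × String) :=
  (l.map (fun ft => (pvRank ft, ft))).filter (fun p => p.1 = r)

lemma pvRank_cases (ft : String) :
    pvRank ft = 0 ∨ pvRank ft = 1 ∨ pvRank ft = 2 ∨ pvRank ft = 3 := by
  simp only [pvRank]; split_ifs <;> simp

-- inserting x after a block it is not-before and before a block it is before
lemma insertBy_middle {α : Type} (before : α → α → Bool) (x : α)
    (ys zs : List α) (h1 : ∀ y ∈ ys, before x y = false)
    (h2 : ∀ z ∈ zs, before x z = true) :
    PySem.List.insertBy before x (ys ++ zs) = ys ++ x :: zs := by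
  induction ys with
  | nil =>
    cases zs with
    | nil => simp [PySem.List.insertBy]
    | cons z zs' => simp [PySem.List.insertBy, h2 z (by simp)]
  | cons y ys' ih =>
    have hy : before x y = false := h1 y (by simp)
    simp only [List.cons_append, PySem.List.insertBy, hy]
    simp only [Bool.false_eq_true, if_false, List.cons.injEq, true_and]
    exact ih (fun y hy => h1 y (by simp [hy]))

-- the stable sort of the decorated list is the concatenation of the buckets
lemma sorted_buckets (l : List String) :
    PySem.List.sorted (l.map (fun ft => (pvRank ft, ft))) (fun p => p.1) false =
      pvBucket 0 l ++ pvBucket 1 l ++ pvBucket 2 l ++ pvBucket 3 l := by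
  rw [PySem.List.sorted_eq_foldl_insertBy]
  induction l using List.reverseRecOn with
  | nil => simp [pvBucket]
  | append_singleton l x ih =>
    rw [List.map_append, List.foldl_append, List.map_singleton, List.foldl_cons,
        List.foldl_nil, ih]
    have hb : ∀ r, pvBucket r (l ++ [x]) =
        pvBucket r l ++ (if pvRank x = r then [(pvRank x, x)] else []) := by
      intro r
      simp only [pvBucket, List.map_append, List.filter_append, List.map_singleton]
      split_ifs with h <;> simp [List.filter, h]
    have hmem : ∀ r (p : Int × String), p ∈ pvBucket r l → p.1 = r := by
      intro r p hp
      simpa using (List.of_mem_filter hp)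
    rcases pvRank_cases x with h | h | h | h
    · rw [show pvBucket 0 l ++ pvBucket 1 l ++ pvBucket 2 l ++ pvBucket 3 l =
            pvBucket 0 l ++ (pvBucket 1 l ++ (pvBucket 2 l ++ pvBucket 3 l)) by
          simp [List.append_assoc]]
      rw [insertBy_middle _ _ _ _
        (by intro y hy; have := hmem 0 y hy; simp [h, this])
        (by intro z hz; simp only [List.mem_append] at hz
            rcases hz with hz | hz | hz
            · have := hmem 1 z hz; simp [h, this]
            · have := hmem 2 z hz; simp [h, this]
            · have := hmem 3 z hz; simp [h, this])]
      simp [hb, h, List.append_assoc]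
    · rw [show pvBucket 0 l ++ pvBucket 1 l ++ pvBucket 2 l ++ pvBucket 3 l =
            (pvBucket 0 l ++ pvBucket 1 l) ++ (pvBucket 2 l ++ pvBucket 3 l) by
          simp [List.append_assoc]]
      rw [insertBy_middle _ _ _ _
        (by intro y hy; simp only [List.mem_append] at hy
            rcases hy with hy | hy
            · have := hmem 0 y hy; simp [h, this]
            · have := hmem 1 y hy; simp [h, this])
        (by intro z hz; simp only [List.mem_append] at hz
            rcases hz with hz | hz
            · have := hmem 2 z hz; simp [h, this]
            · have := hmem 3 z hz; simp [h, this])]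
      simp [hb, h, List.append_assoc]
    · rw [show pvBucket 0 l ++ pvBucket 1 l ++ pvBucket 2 l ++ pvBucket 3 l =
            (pvBucket 0 l ++ pvBucket 1 l ++ pvBucket 2 l) ++ pvBucket 3 l by
          simp [List.append_assoc]]
      rw [insertBy_middle _ _ _ _
        (by intro y hy; simp only [List.mem_append] at hy
            rcases hy with (hy | hy) | hy
            · have := hmem 0 y hy; simp [h, this]
            · have := hmem 1 y hy; simp [h, this]
            · have := hmem 2 y hy; simp [h, this])
        (by intro z hz; have := hmem 3 z hz; simp [h, this])]
      simp [hb, h, List.append_assoc]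
    · rw [PySem.List.insertBy_of_forall_not_before _ _ _
        (by intro y hy; simp only [List.mem_append] at hy
            rcases hy with ((hy | hy) | hy) | hy
            · have := hmem 0 y hy; simp [h, this]
            · have := hmem 1 y hy; simp [h, this]
            · have := hmem 2 y hy; simp [h, this]
            · have := hmem 3 y hy; simp [h, this])]
      simp [hb, h]

-- rank buckets via the A-side predicates
lemma map_snd_bucket (r : Int) (l : List String) :
    (pvBucket r l).map Prod.snd = l.filter (fun ft => pvRank ft = r) := by
  simp [pvBucket, List.filter_map, Function.comp_def]

-- filtering a bucket concatenation by a rank bound keeps whole buckets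
lemma filter_bucket_of_true (r : Int) (l : List String) (q : Int × String → Bool)
    (h : ∀ p : Int × String, p.1 = r → q p = true) :
    (pvBucket r l).filter q = pvBucket r l := by
  apply List.filter_eq_self.mpr
  intro p hp
  exact h p (by simpa using (List.of_mem_filter hp))

lemma filter_bucket_of_false (r : Int) (l : List String) (q : Int × String → Bool)
    (h : ∀ p : Int × String, p.1 = r → q p = false) :
    (pvBucket r l).filter q = [] := by
  apply List.filter_eq_nil_iff.mpr
  intro p hp
  simp [h p (by simpa using (List.of_mem_filter hp))]

-- A's loop with accumulators (p, s) ends with the rank-0 and rank-1 features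
lemma foldl_stepA (l : List String) (p s : List String) :
    l.foldl pvStepA (p, s) =
      (p ++ l.filter (fun ft => pvRank ft = 0),
       s ++ l.filter (fun ft => pvRank ft = 1)) := by
  induction l generalizing p s with
  | nil => simp
  | cons h t ih =>
    simp only [List.foldl_cons, List.filter_cons]
    have hstep : pvStepA (p, s) h =
        if pvRank h = 0 then (p ++ [h], s)
        else if pvRank h = 1 then (p, s ++ [h]) else (p, s) := by
      simp only [pvStepA, pvRank]
      split_ifs <;> simp_all
    rw [hstep]
    rcases pvRank_cases h with hr | hr | hr | hr <;> simp [hr, ih]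

-- A's fallback filter = the rank ≤ 2 features
lemma fallback_eq (l : List String) :
    l.filter (fun ft =>
        !(pvExcludedKw.any (fun k => PySem.Str.isIn k (PySem.Str.lower ft)))) =
      l.filter (fun ft => pvRank ft ≤ 2) := by
  apply List.filter_congr
  intro ft _
  by_cases hexc : (pvExcludedKw.any (fun k => PySem.Str.isIn k (PySem.Str.lower ft))) = true
  · have h3 : pvRank ft = 3 := by simp only [pvRank]; rw [if_pos hexc]
    rw [hexc, h3]
    decide
  · have h2 : pvRank ft ≤ 2 := by
      simp only [pvRank]
      rw [if_neg hexc]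
      split_ifs <;> norm_num
    rw [Bool.eq_false_iff.mpr hexc, Bool.not_false, (decide_eq_true h2)]

-- ===== VERDICT (by name: the statement is the Claim_ definition above) =====
theorem filter_cadastral_types_spec : Claim_equal_filter_cadastral_types := by
  intro feature_types _
  unfold Spec_filter_cadastral_types filter_cadastral_types filter_cadastral_types_alt
  rw [foldl_stepA, sorted_buckets]
  simp only [List.nil_append, List.filter_append, List.map_append]
  rw [filter_bucket_of_true 0 _ _ (by intro p hp; simp [hp]),
      filter_bucket_of_true 1 _ _ (by intro p hp; simp [hp]),
      filter_bucket_of_false 2 _ (fun p => decide (p.1 ≤ 1)) (by intro p hp; simp [hp]),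
      filter_bucket_of_false 3 _ (fun p => decide (p.1 ≤ 1)) (by intro p hp; simp [hp]),
      filter_bucket_of_true 0 _ (fun p => decide (p.1 ≤ 2)) (by intro p hp; simp [hp]),
      filter_bucket_of_true 1 _ (fun p => decide (p.1 ≤ 2)) (by intro p hp; simp [hp]),
      filter_bucket_of_true 2 _ (fun p => decide (p.1 ≤ 2)) (by intro p hp; simp [hp]),
      filter_bucket_of_false 3 _ (fun p => decide (p.1 ≤ 2)) (by intro p hp; simp [hp])]
  simp only [List.map_nil, List.append_nil, map_snd_bucket, fallback_eq]
  by_cases hA : (feature_types.filter (fun ft => pvRank ft = 0) ++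
      feature_types.filter (fun ft => pvRank ft = 1)) = [] ∧ feature_types ≠ []
  · rw [if_pos hA, if_neg (by push Not; exact ⟨hA.1, hA.2⟩)]
    have h01 := List.append_eq_nil_iff.mp hA.1
    have hno : ∀ r, feature_types.filter (fun ft => decide (pvRank ft = r)) = [] →
        ∀ ft ∈ feature_types, pvRank ft ≠ r := by
      intro r hnil ft hft hr
      have hmem : ft ∈ feature_types.filter (fun ft => decide (pvRank ft = r)) :=
        List.mem_filter.mpr ⟨hft, by simp [hr]⟩
      rw [hnil] at hmem
      exact absurd hmem (List.not_mem_nil)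
    rw [h01.1, h01.2, List.nil_append, List.nil_append]
    apply List.filter_congr
    intro ft hft
    rcases pvRank_cases ft with hr | hr | hr | hr
    · exact absurd hr (hno 0 h01.1 ft hft)
    · exact absurd hr (hno 1 h01.2 ft hft)
    · simp [hr]
    · simp [hr]
  · rw [if_neg hA]
    rcases not_and_or.mp hA with h1 | h2
    · rw [if_pos (Or.inl h1)]
    · rw [if_pos (Or.inr (not_not.mp h2))]
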